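-- pv_equiv track=rewrite | github.com/elimulink/elimulink | backend/app/services/chemistry_service.py | _chem_formula_latex
-- ===== SOURCE A (Python) =====
-- def _chem_formula_latex(formula: str) -> str:
--     text = str(formula or "").strip()
--     if not text:
--         return ""
--     converted = []
--     index = 0
--     while index < len(text):
--         char = text[index]
--         if char.isdigit():
--             digits = [char]
--             index += 1
--             while index < len(text) and text[index].isdigit():
--                 digits.append(text[index])
--                 index += 1
--             converted.append(f"_{{{''.join(digits)}}}")
--             continue
--         if char == "^" and index + 1 < len(text):
--             exponent = []
--             index += 1
--             while index < len(text) and (text[index].isdigit() or text[index] in "+-"):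
--                 exponent.append(text[index])
--                 index += 1
--             if exponent:
--                 converted.append(f"^{{{''.join(exponent)}}}")
--                 continue
--             converted.append("^")
--             continue
--         if text.startswith("->", index):
--             converted.append(r"\rightarrow ")
--             index += 2
--             continue
--         converted.append(char)
--         index += 1
--     return f"\\mathrm{{{''.join(converted)}}}"
-- ===== SOURCE B (Python) =====
-- def _chem_formula_latex(formula: str) -> str:
--     # Tokenizer decomposition: peel one token (digit run / "->" / "^"+signs-digits / char)
--     # off the front at a time, map each token to its LaTeX form, then join.
--     text = str(formula or "").strip()
--     if not text:
--         return ""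
--
--     def token(s):
--         # s is nonempty; return (latex for first token, remaining text)
--         c = s[0]
--         if c.isdigit():
--             n = len(s) - len(s.lstrip("0123456789"))
--             return "_{" + s[:n] + "}", s[n:]
--         if s.startswith("->"):
--             return "\\rightarrow ", s[2:]
--         if c == "^":
--             rest = s[1:]
--             n = len(rest) - len(rest.lstrip("0123456789+-"))
--             if n:
--                 return "^{" + rest[:n] + "}", rest[n:]
--         return c, s[1:]
--
--     parts = []
--     s = text
--     while s:
--         t, s = token(s)
--         parts.append(t)
--     return "\\mathrm{" + "".join(parts) + "}"
-- ===== Notes on version B (the rewrite author's own statement) =====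
-- stated objective: idiomatic
-- what changed: Replaces A's index-driven while loop with nested digit/exponent collector loops and startswith-at-index checks by a front-token lexer: a token(s) helper peels one token (digit run, '->', '^'+signs/digits, or a single char) off the front of the remaining string, the main loop collects the LaTeX pieces and joins them.
import Mathlib
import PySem

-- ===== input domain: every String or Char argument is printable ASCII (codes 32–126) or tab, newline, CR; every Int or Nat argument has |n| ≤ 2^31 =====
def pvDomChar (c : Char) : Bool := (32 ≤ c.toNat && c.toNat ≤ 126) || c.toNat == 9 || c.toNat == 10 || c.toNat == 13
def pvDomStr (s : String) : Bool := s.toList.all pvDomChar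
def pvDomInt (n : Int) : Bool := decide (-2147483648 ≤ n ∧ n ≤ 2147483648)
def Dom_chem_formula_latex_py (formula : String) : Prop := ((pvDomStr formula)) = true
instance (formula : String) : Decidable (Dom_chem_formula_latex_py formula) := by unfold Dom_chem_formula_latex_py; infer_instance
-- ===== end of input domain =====

-- B replaces A's index-driven while loop (with two nested collector loops) by a
-- front-token lexer: peel one token off the front, map it to LaTeX, join; objective: idiomatic.

-- ===== PORT A =====
-- inner 'while … .isdigit(): digits.append(…)' loop of A
def chemA_takeDigits (acc : List Char) : List Char → List Char × List Char
  | [] => (acc, [])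
  | c :: rest =>
    if PySem.Chars.isdigit c then chemA_takeDigits (acc ++ [c]) rest else (acc, c :: rest)

-- inner exponent-collecting loop of A ('.isdigit() or … in "+-"'; the 2-char membership is the two equalities, exact)
def chemA_takeExp (acc : List Char) : List Char → List Char × List Char
  | [] => (acc, [])
  | c :: rest =>
    if PySem.Chars.isdigit c || c == '+' || c == '-' then chemA_takeExp (acc ++ [c]) rest
    else (acc, c :: rest)

theorem chemA_takeDigits_len (l : List Char) : ∀ acc, (chemA_takeDigits acc l).2.length ≤ l.length := by
  induction l with
  | nil => intro acc; simp [chemA_takeDigits]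
  | cons c rest ih =>
    intro acc
    simp only [chemA_takeDigits]
    split
    · exact le_trans (ih _) (Nat.le_succ _)
    · simp

theorem chemA_takeExp_len (l : List Char) : ∀ acc, (chemA_takeExp acc l).2.length ≤ l.length := by
  induction l with
  | nil => intro acc; simp [chemA_takeExp]
  | cons c rest ih =>
    intro acc
    simp only [chemA_takeExp]
    split
    · exact le_trans (ih _) (Nat.le_succ _)
    · simp

-- A's main 'while index < len(text)' loop, branch for branch
def chemA_loop : List Char → List Char
  | [] => []
  | c :: rest =>
    if PySem.Chars.isdigit c then
      "_{".toList ++ (chemA_takeDigits [c] rest).1 ++ "}".toList ++ chemA_loop (chemA_takeDigits [c] rest).2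
    else if c == '^' && !rest.isEmpty then
      if !(chemA_takeExp [] rest).1.isEmpty then
        "^{".toList ++ (chemA_takeExp [] rest).1 ++ "}".toList ++ chemA_loop (chemA_takeExp [] rest).2
      else '^' :: chemA_loop (chemA_takeExp [] rest).2
    else if PySem.Chars.startswith (c :: rest) "->".toList then
      "\\rightarrow ".toList ++ chemA_loop (rest.drop 1)
    else c :: chemA_loop rest
termination_by l => l.length
decreasing_by
  · exact Nat.lt_succ_of_le (chemA_takeDigits_len rest [c])
  · exact Nat.lt_succ_of_le (chemA_takeExp_len rest [])
  · exact Nat.lt_succ_of_le (chemA_takeExp_len rest [])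
  · simp
  · exact Nat.lt_succ_self _

def chem_formula_latex_py (formula : String) : String :=
  let text := PySem.Chars.strip (if formula = "" then "" else formula).toList
  if text.isEmpty then ""
  else String.ofList ("\\mathrm{".toList ++ chemA_loop text ++ "}".toList)

-- ===== PORT B =====
-- Source B's token(s): the first token of a nonempty s and the rest
-- (len - len(lstrip(chars)) prefix-count + slices ported as takeWhile/dropWhile of the same char class, exact)
def chemB_token : List Char → List Char × List Char
  | [] => ([], [])
  | c :: rest =>
    if PySem.Chars.isdigit c then
      ("_{".toList ++ (c :: rest).takeWhile PySem.Chars.isdigit ++ "}".toList,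
       (c :: rest).dropWhile PySem.Chars.isdigit)
    else if PySem.Chars.startswith (c :: rest) "->".toList then
      ("\\rightarrow ".toList, rest.drop 1)
    else if c == '^' then
      if !(rest.takeWhile (fun d => PySem.Chars.isdigit d || d == '+' || d == '-')).isEmpty then
        ("^{".toList ++ rest.takeWhile (fun d => PySem.Chars.isdigit d || d == '+' || d == '-') ++ "}".toList,
         rest.dropWhile (fun d => PySem.Chars.isdigit d || d == '+' || d == '-'))
      else ([c], rest)
    else ([c], rest)

theorem chemB_token_len (c : Char) (rest : List Char) :
    (chemB_token (c :: rest)).2.length < (c :: rest).length := by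
  simp only [chemB_token]
  split
  · rw [List.dropWhile_cons, if_pos (by assumption)]
    exact Nat.lt_succ_of_le (List.length_dropWhile_le _ _)
  · split
    · simp
    · split
      · split
        · exact Nat.lt_succ_of_le (List.length_dropWhile_le _ _)
        · exact Nat.lt_succ_self _
      · exact Nat.lt_succ_self _

-- Source B's 'while s: t, s = token(s); parts.append(t)'
def chemB_loop : List Char → List (List Char)
  | [] => []
  | c :: rest =>
    (chemB_token (c :: rest)).1 :: chemB_loop (chemB_token (c :: rest)).2
termination_by l => l.length
decreasing_by exact chemB_token_len c rest

def chem_formula_latex_py_alt (formula : String) : String :=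
  let text := PySem.Chars.strip (if formula = "" then "" else formula).toList
  if text.isEmpty then ""
  else String.ofList ("\\mathrm{".toList ++ PySem.Chars.join [] (chemB_loop text) ++ "}".toList)

-- ===== PRECONDITION & SPEC =====
def Spec_chem_formula_latex_py (formula : String) (out : String) : Prop := out = chem_formula_latex_py_alt formula
instance (formula : String) (out : String) : Decidable (Spec_chem_formula_latex_py formula out) := by unfold Spec_chem_formula_latex_py; infer_instance

-- ===== CLAIM (what is proved, stated in full; the proofs are below) =====
def Claim_equal_chem_formula_latex_py : Prop := ∀ (formula : String), Dom_chem_formula_latex_py formula → Spec_chem_formula_latex_py formula (chem_formula_latex_py formula)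

-- ===== LEMMAS AND PROOFS =====
theorem chemA_takeDigits_eq (l : List Char) : ∀ acc,
    chemA_takeDigits acc l = (acc ++ l.takeWhile PySem.Chars.isdigit, l.dropWhile PySem.Chars.isdigit) := by
  induction l with
  | nil => intro acc; simp [chemA_takeDigits]
  | cons c rest ih =>
    intro acc
    simp only [chemA_takeDigits, List.takeWhile, List.dropWhile]
    by_cases h : PySem.Chars.isdigit c
    · simp [h, ih]
    · simp [h]

theorem chemA_takeExp_eq (l : List Char) : ∀ acc,
    chemA_takeExp acc l = (acc ++ l.takeWhile (fun d => PySem.Chars.isdigit d || d == '+' || d == '-'),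
                           l.dropWhile (fun d => PySem.Chars.isdigit d || d == '+' || d == '-')) := by
  induction l with
  | nil => intro acc; simp [chemA_takeExp]
  | cons c rest ih =>
    intro acc
    simp only [chemA_takeExp, List.takeWhile, List.dropWhile]
    by_cases h : (PySem.Chars.isdigit c || c == '+' || c == '-') = true
    · simp [h, ih]
    · simp [h]

theorem join_nil_cons (x : List Char) (xs : List (List Char)) :
    PySem.Chars.join [] (x :: xs) = x ++ PySem.Chars.join [] xs := by
  cases xs with
  | nil => simp [PySem.Chars.join_singleton, PySem.Chars.join_nil]
  | cons y ys => simp [PySem.Chars.join_cons_cons]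

theorem chemB_token_caret (rest : List Char) :
    chemB_token ('^' :: rest) =
      if !(rest.takeWhile (fun d => PySem.Chars.isdigit d || d == '+' || d == '-')).isEmpty then
        ("^{".toList ++ rest.takeWhile (fun d => PySem.Chars.isdigit d || d == '+' || d == '-') ++ "}".toList,
         rest.dropWhile (fun d => PySem.Chars.isdigit d || d == '+' || d == '-'))
      else (['^'], rest) := by
  have hsw : PySem.Chars.startswith ('^' :: rest) "->".toList = false := by
    rw [Bool.eq_false_iff]
    intro hx
    obtain ⟨t, ht⟩ := (PySem.Chars.startswith_iff _ _).mp hx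
    simp at ht
  have hdig : PySem.Chars.isdigit '^' = false := by decide
  simp only [chemB_token, hdig, Bool.false_eq_true, if_false, hsw, beq_self_eq_true, if_true]

theorem chemA_loop_eq (l : List Char) : chemA_loop l = PySem.Chars.join [] (chemB_loop l) := by
  induction l using chemA_loop.induct with
  | case1 => simp [chemA_loop, chemB_loop, PySem.Chars.join_nil]
  | case2 c rest hd ih =>
    rw [chemA_loop, chemB_loop, join_nil_cons]
    rw [chemA_takeDigits_eq] at ih
    simp only [chemB_token, chemA_takeDigits_eq, hd, if_true, List.takeWhile_cons, List.dropWhile_cons]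
    simp [ih]
  | case3 c rest hd hc hne ih =>
    have hcc : c = '^' := by simpa using ((Bool.and_eq_true _ _).mp hc).1
    subst hcc
    rw [chemA_loop, chemB_loop, join_nil_cons]
    rw [if_neg hd, if_pos hc, if_pos hne]
    simp only [chemA_takeExp_eq, List.nil_append] at ih hne ⊢
    rw [chemB_token_caret, if_pos hne]
    simp [ih]
  | case4 c rest hd hc hne ih =>
    have hcc : c = '^' := by simpa using ((Bool.and_eq_true _ _).mp hc).1
    subst hcc
    obtain ⟨r, rs, hre⟩ : ∃ r rs, rest = r :: rs := by
      cases rest with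
      | nil => simp at hc
      | cons r rs => exact ⟨r, rs, rfl⟩
    subst hre
    have hpr : (PySem.Chars.isdigit r || r == '+' || r == '-') = false := by
      rw [Bool.eq_false_iff]
      intro hx
      rw [chemA_takeExp_eq] at hne
      exact hne (by simp [hx])
    have htw : (r :: rs).takeWhile (fun d => PySem.Chars.isdigit d || d == '+' || d == '-') = [] := by
      simp [hpr]
    have hdw : (r :: rs).dropWhile (fun d => PySem.Chars.isdigit d || d == '+' || d == '-') = r :: rs := by
      simp [hpr]
    rw [chemA_loop, chemB_loop, join_nil_cons]
    rw [if_neg hd, if_pos hc, if_neg hne]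
    rw [chemB_token_caret, if_neg (by simp [htw])]
    rw [chemA_takeExp_eq] at ih
    simp only [chemA_takeExp_eq, List.nil_append, hdw] at ih ⊢
    simp [ih]
  | case5 c rest hd hc hsw ih =>
    rw [chemA_loop, chemB_loop, join_nil_cons]
    rw [if_neg hd, if_neg hc, if_pos hsw]
    simp only [chemB_token, if_neg hd, hsw, if_true]
    rw [List.drop_one] at ih
    simp [ih]
  | case6 c rest hd hc hsw ih =>
    rw [chemA_loop, chemB_loop, join_nil_cons]
    rw [if_neg hd, if_neg hc, if_neg hsw]
    simp only [chemB_token, if_neg hd, if_neg hsw]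
    by_cases h : c = '^'
    · subst h
      have hre : rest = [] := by
        cases rest with
        | nil => rfl
        | cons r rs => exact absurd (by simp) hc
      subst hre
      simp [chemA_loop, chemB_loop, List.takeWhile_nil]
    · simp [h, ih]

-- ===== VERDICT (by name: the statement is the Claim_ definition above) =====
theorem chem_formula_latex_py_spec : Claim_equal_chem_formula_latex_py := by
  intro formula _
  unfold Spec_chem_formula_latex_py chem_formula_latex_py chem_formula_latex_py_alt
  simp only [chemA_loop_eq]
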